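-- pv_equiv track=rewrite | github.com/Guilherme0321/Trabalhos_Faculdade | Segundo Periodo/Arquitetura de computadores/2023-2_arq1_guia_02/Python/bin2double.py | is_bin
-- ===== SOURCE A (Python) =====
-- def is_bin(num:str):
--     isTrue = True
--     count:int = 0
--     for i in num:
--         if not('0' <= i and i <= '1' or i == '.' or i == ','):
--             isTrue = False
--         if i == '.':
--             count += 1
--         if count > 1:
--             isTrue = False
--     return isTrue
-- ===== SOURCE B (Python) =====
-- def is_bin(num: str):
--     segments = num.split('.')
--     if len(segments) > 2:
--         return False
--     return all(c in '01,' for seg in segments for c in seg)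
-- ===== Notes on version B (the rewrite author's own statement) =====
-- stated objective: simpler
-- what changed: B splits the string at the dot separator and checks that there are at most two segments and that every remaining character is a binary digit or a comma, replacing A's single stateful pass that maintains a validity flag and a running dot counter.
import Mathlib
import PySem

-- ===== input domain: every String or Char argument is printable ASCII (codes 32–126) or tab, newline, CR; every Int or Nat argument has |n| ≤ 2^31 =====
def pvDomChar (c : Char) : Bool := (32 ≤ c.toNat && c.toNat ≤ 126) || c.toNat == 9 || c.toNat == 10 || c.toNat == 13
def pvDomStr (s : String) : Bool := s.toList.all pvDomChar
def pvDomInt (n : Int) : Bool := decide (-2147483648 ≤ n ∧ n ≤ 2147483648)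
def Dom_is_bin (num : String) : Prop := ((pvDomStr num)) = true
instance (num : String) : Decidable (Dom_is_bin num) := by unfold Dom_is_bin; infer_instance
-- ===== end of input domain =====

-- B splits on '.' and checks segment count ≤ 2 plus flat membership in '01,', instead of A's stateful pass with a flag and dot counter (objective: simpler).


-- ===== PORT A =====
-- one loop step of A: update (isTrue, count) for character i
def isBinStep (st : Bool × Int) (i : Char) : Bool × Int :=
  let isTrue1 := if ¬(('0' ≤ i ∧ i ≤ '1') ∨ i = '.' ∨ i = ',') then false else st.1
  let count1 := if i = '.' then st.2 + 1 else st.2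
  let isTrue2 := if count1 > 1 then false else isTrue1
  (isTrue2, count1)

def is_bin (num : String) : Bool :=
  (num.toList.foldl isBinStep (true, (0 : Int))).1

-- ===== PORT B =====
def is_bin_alt (num : String) : Bool :=
  let segments := PySem.Chars.splitOn num.toList ['.']
  if segments.length > 2 then false
  else segments.all (fun seg => seg.all (fun c => PySem.Chars.isIn [c] ['0', '1', ',']))

-- ===== PRECONDITION & SPEC =====
def Spec_is_bin (num : String) (out : Bool) : Prop := out = is_bin_alt num
instance (num : String) (out : Bool) : Decidable (Spec_is_bin num out) := by unfold Spec_is_bin; infer_instance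

-- ===== CLAIM (what is proved, stated in full; the proofs are below) =====
def Claim_equal_is_bin : Prop := ∀ (num : String), Dom_is_bin num → Spec_is_bin num (is_bin num)

-- ===== LEMMAS AND PROOFS =====

-- A's valid-character test
def pvValid (c : Char) : Bool := decide (('0' ≤ c ∧ c ≤ '1') ∨ c = '.' ∨ c = ',')

lemma foldl_isBinStep (l : List Char) (b : Bool) (k : Int) :
    l.foldl isBinStep (b, k) =
      ((if l.isEmpty then b
        else b && l.all pvValid && decide (k + (l.count '.' : Int) ≤ 1)),
       k + (l.count '.' : Int)) := by
  induction l generalizing b k with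
  | nil => simp
  | cons c rest ih =>
    simp only [List.foldl_cons, isBinStep, ih, List.isEmpty_cons, List.count_cons,
      List.all_cons]
    rw [Prod.mk.injEq]
    refine ⟨?_, by by_cases hc : c = '.' <;> simp [hc] <;> (try push_cast) <;> (try ring)⟩
    by_cases hc : c = '.'
    · subst hc
      cases rest with
      | nil =>
        simp only [List.isEmpty_nil, if_true, List.count_nil, pvValid]
        split_ifs <;> simp_all <;> omega
      | cons d r =>
        simp only [List.isEmpty_cons, pvValid]
        by_cases hb : b <;> split_ifs <;> simp_all <;>
          (try (first
            | omega
            | (intros; omega)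
            | (congr 1; rw [decide_eq_decide]; omega)))
    · cases rest with
      | nil =>
        simp only [List.isEmpty_nil, if_true, List.count_nil, if_neg hc, pvValid]
        split_ifs <;> simp_all <;> omega
      | cons d r =>
        simp only [List.isEmpty_cons, if_neg hc, pvValid]
        split_ifs <;> simp_all <;>
          (try (first
            | omega
            | (intros; omega)
            | (congr 1; rw [decide_eq_decide]; omega)))

lemma is_bin_eq (num : String) :
    is_bin num = (num.toList.all pvValid && decide (num.toList.count '.' ≤ 1)) := by
  rw [is_bin, foldl_isBinStep]
  cases h : num.toList with
  | nil => simp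
  | cons c r =>
    simp only [List.isEmpty_cons, Bool.false_eq_true, if_false, Bool.true_and]
    congr 1
    rw [decide_eq_decide]
    omega

-- the natural recursion computed by splitOn.go for separator ['.']
def pvConsume : List Char → List Char → List (List Char)
  | [], cur => [cur.reverse]
  | c :: r, cur => if c = '.' then cur.reverse :: pvConsume r [] else pvConsume r (c :: cur)

lemma splitOn_go_eq (l : List Char) : ∀ (fuel : Nat) (cur : List Char)
    (acc : List (List Char)), l.length ≤ fuel →
    PySem.Chars.splitOn.go ['.'] fuel l cur acc = acc.reverse ++ pvConsume l cur := by
  induction l with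
  | nil =>
    intro fuel cur acc _
    cases fuel <;> rw [PySem.Chars.splitOn.go] <;> simp [pvConsume]
  | cons c r ih =>
    intro fuel cur acc hf
    cases fuel with
    | zero => simp at hf
    | succ fuel =>
      rw [PySem.Chars.splitOn.go]
      by_cases hc : c = '.'
      · subst hc
        simp only [List.isPrefixOf, if_pos]
        rw [if_pos (by simp [List.isPrefixOf])]
        have hd : List.drop (['.'] : List Char).length ('.' :: r) = r := rfl
        rw [hd]
        simp only [List.length_cons] at hf
        rw [ih fuel [] (cur.reverse :: acc) (by omega)]
        simp [pvConsume]
      · rw [if_neg (by simp [List.isPrefixOf]; intro h; exact absurd h.symm hc)]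
        simp only [List.length_cons] at hf
        rw [ih fuel (c :: cur) acc (by omega)]
        simp [pvConsume, hc]

lemma length_pvConsume (l : List Char) : ∀ cur,
    (pvConsume l cur).length = l.count '.' + 1 := by
  induction l with
  | nil => intro cur; simp [pvConsume]
  | cons c r ih =>
    intro cur
    by_cases hc : c = '.' <;> simp [pvConsume, hc, List.count_cons, ih]

lemma all_pvConsume (q : Char → Bool) (l : List Char) : ∀ cur,
    (pvConsume l cur).all (fun seg => seg.all q) =
      (cur.all q && l.all (fun c => c == '.' || q c)) := by
  induction l with
  | nil => intro cur; simp [pvConsume]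
  | cons c r ih =>
    intro cur
    by_cases hc : c = '.'
    · simp [pvConsume, hc, ih]
    · simp only [pvConsume, if_neg hc, ih, List.all_cons, List.all_cons]
      cases q c <;> cases cur.all q <;> simp [hc]

lemma mem_01comma (c : Char) :
    PySem.Chars.isIn [c] ['0', '1', ','] = (c == '0' || c == '1' || c == ',') := by
  rcases h : PySem.Chars.isIn [c] ['0', '1', ','] with _ | _
  · rw [PySem.Chars.isIn_eq_false_iff] at h
    have : ¬ (c = '0' ∨ c = '1' ∨ c = ',') := by
      intro hc
      apply h
      rcases hc with h | h | h <;> subst h <;> decide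
    simp at this
    simp [this]
  · rw [PySem.Chars.isIn_iff_infix] at h
    have hm : c ∈ ['0', '1', ','] := by
      have := h.sublist.subset
      simp at this
      simpa using this
    simp at hm
    rcases hm with h | h | h <;> simp [h]

lemma range01 (c : Char) : (('0' ≤ c ∧ c ≤ '1') ↔ (c = '0' ∨ c = '1')) := by
  constructor
  · rintro ⟨h1, h2⟩
    rw [Char.le_def] at h1 h2
    have h1' : (48 : Nat) ≤ c.val.toNat := h1
    have h2' : c.val.toNat ≤ 49 := h2
    have : c.val.toNat = 48 ∨ c.val.toNat = 49 := by omega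
    rcases this with h | h
    · left; apply Char.ext; apply UInt32.toNat_inj.mp; simpa using h
    · right; apply Char.ext; apply UInt32.toNat_inj.mp; simpa using h
  · rintro (h | h) <;> subst h <;> exact ⟨by decide, by decide⟩

lemma valid_eq (c : Char) : pvValid c = (c == '.' || (c == '0' || c == '1' || c == ',')) := by
  simp only [pvValid]
  by_cases h : c = '.'
  · simp [h]
  · by_cases h0 : c = '0'
    · simp [h0]
    · by_cases h1 : c = '1'
      · simp [h1]
      · by_cases hm : c = ','
        · simp [hm]
        · have : ¬ ('0' ≤ c ∧ c ≤ '1') := fun hr => by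
            rcases (range01 c).mp hr with h | h <;> simp_all
          simp [h, h0, h1, hm, this]

lemma is_bin_alt_eq (num : String) :
    is_bin_alt num =
      (decide (num.toList.count '.' ≤ 1) &&
        num.toList.all (fun c => c == '.' || (c == '0' || c == '1' || c == ','))) := by
  rw [is_bin_alt]
  have hsplit : PySem.Chars.splitOn num.toList ['.'] = pvConsume num.toList [] := by
    rw [PySem.Chars.splitOn, splitOn_go_eq num.toList (num.toList.length + 1) [] [] (by omega)]
    simp
  simp only [hsplit, length_pvConsume]
  by_cases h : num.toList.count '.' + 1 > 2
  · rw [if_pos h]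
    have : ¬ (num.toList.count '.' ≤ 1) := by omega
    simp [this]
  · rw [if_neg h]
    have h1 : num.toList.count '.' ≤ 1 := by omega
    have := all_pvConsume (fun c => PySem.Chars.isIn [c] ['0', '1', ',']) num.toList []
    simp only [List.all_nil, Bool.true_and] at this
    rw [this]
    simp only [h1, decide_true, Bool.true_and]
    apply List.all_congr rfl
    intro c
    rw [mem_01comma]

-- ===== VERDICT (by name: the statement is the Claim_ definition above) =====
theorem is_bin_spec : Claim_equal_is_bin := by
  intro num _
  unfold Spec_is_bin
  rw [is_bin_eq, is_bin_alt_eq, Bool.and_comm]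
  congr 1
  apply List.all_congr rfl
  intro c
  rw [valid_eq]
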